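-- pv_equiv track=rewrite | github.com/JSHWJ/QA_helper | app.py | build_github_like_pages
-- ===== SOURCE A (Python) =====
-- def build_github_like_pages(total_pages: int, current: int) -> list[int | None]:
--     if total_pages <= 7:
--         return list(range(1, total_pages + 1))
--
--     pages = {1, total_pages, current - 1, current, current + 1}
--     pages = {p for p in pages if 1 <= p <= total_pages}
--     ordered = sorted(pages)
--
--     items: list[int | None] = []
--     prev = None
--     for p in ordered:
--         if prev is not None and p - prev > 1:
--             items.append(None)
--         items.append(p)
--         prev = p
--     return items
-- ===== SOURCE B (Python) =====
-- def build_github_like_pages(total_pages: int, current: int) -> list[int | None]: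
--     # Simpler: compute the middle window arithmetically; no set, no sort, no gap scan.
--     if total_pages <= 7:
--         return list(range(1, total_pages + 1))
--     left = max(2, current - 1)
--     right = min(total_pages - 1, current + 1)
--     items: list[int | None] = [1]
--     if left > 2:
--         items.append(None)
--     items.extend(range(left, right + 1))
--     if right < total_pages - 1:
--         items.append(None)
--     items.append(total_pages)
--     return items
-- ===== Notes on version B (the rewrite author's own statement) =====
-- stated objective: simpler
-- what changed: Replaces the set-build / filter / sort / gap-scanning loop with a direct arithmetic construction: clamp the window [current-1, current+1] to [2, total_pages-1] and emit the two ellipses from boundary comparisons.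
import Mathlib
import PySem

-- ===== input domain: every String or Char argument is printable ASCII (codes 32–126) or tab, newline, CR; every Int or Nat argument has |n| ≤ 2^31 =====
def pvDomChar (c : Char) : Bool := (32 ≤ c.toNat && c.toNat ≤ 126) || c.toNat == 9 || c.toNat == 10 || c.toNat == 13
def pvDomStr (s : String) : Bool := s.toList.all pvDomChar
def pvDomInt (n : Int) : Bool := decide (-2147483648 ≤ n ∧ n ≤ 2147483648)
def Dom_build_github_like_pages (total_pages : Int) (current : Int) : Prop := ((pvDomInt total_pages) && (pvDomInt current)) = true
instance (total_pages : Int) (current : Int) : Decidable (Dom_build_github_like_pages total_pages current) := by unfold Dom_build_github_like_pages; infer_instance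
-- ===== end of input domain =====

-- B replaces A's set/filter/sort/gap-scan with a direct arithmetic window construction (simpler, same values).


-- ===== PORT A =====
def build_github_like_pages (total_pages : Int) (current : Int) : List (Option Int) :=
  if total_pages ≤ 7 then
    (PySem.List.pyRange 1 (total_pages + 1) 1).map Option.some
  else
    let pages : PySem.Set Int := PySem.Set.ofList [1, total_pages, current - 1, current, current + 1]
    let pages : PySem.Set Int := PySem.Set.ofList (pages.filter (fun p => decide (1 ≤ p) && decide (p ≤ total_pages)))
    let ordered := PySem.List.sorted pages (fun x => x) false
    (ordered.foldl (fun (st : List (Option Int) × Option Int) p =>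
      ((match st.2 with
        | some q => if 1 < p - q then st.1 ++ [none] else st.1
        | none => st.1) ++ [some p], some p)) ([], none)).1

-- ===== PORT B =====
def build_github_like_pages_alt (total_pages : Int) (current : Int) : List (Option Int) :=
  if total_pages ≤ 7 then
    (PySem.List.pyRange 1 (total_pages + 1) 1).map Option.some
  else
    let left := max 2 (current - 1)
    let right := min (total_pages - 1) (current + 1)
    [some 1]
      ++ (if 2 < left then [(none : Option Int)] else [])
      ++ (PySem.List.pyRange left (right + 1) 1).map Option.some
      ++ (if right < total_pages - 1 then [(none : Option Int)] else [])
      ++ [some total_pages]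

-- ===== PRECONDITION & SPEC =====
def Spec_build_github_like_pages (total_pages : Int) (current : Int) (out : List (Option Int)) : Prop := out = build_github_like_pages_alt total_pages current
instance (total_pages : Int) (current : Int) (out : List (Option Int)) : Decidable (Spec_build_github_like_pages total_pages current out) := by unfold Spec_build_github_like_pages; infer_instance

-- ===== CLAIM (what is proved, stated in full; the proofs are below) =====
def Claim_equal_build_github_like_pages : Prop := ∀ (total_pages : Int) (current : Int), Dom_build_github_like_pages total_pages current → Spec_build_github_like_pages total_pages current (build_github_like_pages total_pages current)

-- ===== LEMMAS AND PROOFS =====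

-- a strictly increasing list with the same members as l is sorted(set(l))
lemma sorted_set_eq (l ys : List Int) (hy : ys.Pairwise (· < ·))
    (hmem : ∀ a : Int, a ∈ ys ↔ a ∈ l) :
    PySem.List.sorted (PySem.Set.ofList l) (fun x => x) = ys := by
  have hx : (PySem.List.sorted (PySem.Set.ofList l) (fun x => x)).Pairwise (· < ·) :=
    PySem.List.sorted_ofList_pairwise_lt l
  have hperm : (PySem.List.sorted (PySem.Set.ofList l) (fun x => x)).Perm ys := by
    apply List.perm_of_nodup_nodup_toFinset_eq (hx.imp ne_of_lt) (hy.imp ne_of_lt)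
    ext a
    simp only [List.mem_toFinset, PySem.List.mem_sorted, PySem.Set.mem_ofList, hmem]
  exact hperm.eq_of_pairwise (fun a b _ _ h1 h2 => absurd h2 (by omega)) hx hy

lemma case_low (tp c : Int) (h : ¬ tp ≤ 7) (hc : c ≤ 0) :
    build_github_like_pages tp c = build_github_like_pages_alt tp c := by
  simp only [build_github_like_pages, build_github_like_pages_alt, if_neg h]
  have hs : PySem.List.sorted (PySem.Set.ofList (List.filter
      (fun p => decide (1 ≤ p) && decide (p ≤ tp))
      (PySem.Set.ofList [1, tp, c - 1, c, c + 1]))) (fun x => x) = [1, tp] := by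
    apply sorted_set_eq
    · refine List.Pairwise.cons ?_ (List.pairwise_singleton _ _)
      intro a ha; simp only [List.mem_cons, List.not_mem_nil, or_false] at ha; omega
    · intro a
      simp only [List.mem_filter, PySem.Set.mem_ofList, List.mem_cons, List.not_mem_nil,
        Bool.and_eq_true, decide_eq_true_eq, or_false]
      omega
  rw [hs]
  rw [show max 2 (c - 1) = 2 from by omega, show min (tp - 1) (c + 1) = c + 1 from by omega]
  rw [PySem.List.pyRange_one_eq_nil (by omega)]
  simp only [List.foldl, List.map, List.append_assoc, List.cons_append, List.nil_append]
  split_ifs <;> simp_all <;> omega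

lemma case_one (tp c : Int) (h : ¬ tp ≤ 7) (hc : c = 1) :
    build_github_like_pages tp c = build_github_like_pages_alt tp c := by
  simp only [build_github_like_pages, build_github_like_pages_alt, if_neg h]
  have hs : PySem.List.sorted (PySem.Set.ofList (List.filter
      (fun p => decide (1 ≤ p) && decide (p ≤ tp))
      (PySem.Set.ofList [1, tp, c - 1, c, c + 1]))) (fun x => x) = [1, 2, tp] := by
    apply sorted_set_eq
    · refine List.Pairwise.cons ?_ (List.Pairwise.cons ?_ (List.pairwise_singleton _ _)) <;>
        (intro a ha; simp only [List.mem_cons, List.not_mem_nil, or_false] at ha; omega)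
    · intro a
      simp only [List.mem_filter, PySem.Set.mem_ofList, List.mem_cons, List.not_mem_nil,
        Bool.and_eq_true, decide_eq_true_eq, or_false]
      omega
  rw [hs]
  rw [show max 2 (c - 1) = 2 from by omega, show min (tp - 1) (c + 1) = 2 from by omega]
  rw [PySem.List.pyRange_one_cons (by omega), PySem.List.pyRange_one_eq_nil (by omega)]
  simp only [List.foldl, List.map, List.append_assoc, List.cons_append, List.nil_append]
  split_ifs <;> simp_all <;> omega

lemma case_two (tp c : Int) (h : ¬ tp ≤ 7) (hc : c = 2) :
    build_github_like_pages tp c = build_github_like_pages_alt tp c := by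
  simp only [build_github_like_pages, build_github_like_pages_alt, if_neg h]
  have hs : PySem.List.sorted (PySem.Set.ofList (List.filter
      (fun p => decide (1 ≤ p) && decide (p ≤ tp))
      (PySem.Set.ofList [1, tp, c - 1, c, c + 1]))) (fun x => x) = [1, 2, 3, tp] := by
    apply sorted_set_eq
    · refine List.Pairwise.cons ?_ (List.Pairwise.cons ?_ (List.Pairwise.cons ?_
        (List.pairwise_singleton _ _))) <;>
        (intro a ha; simp only [List.mem_cons, List.not_mem_nil, or_false] at ha; omega)
    · intro a
      simp only [List.mem_filter, PySem.Set.mem_ofList, List.mem_cons, List.not_mem_nil,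
        Bool.and_eq_true, decide_eq_true_eq, or_false]
      omega
  rw [hs]
  rw [show max 2 (c - 1) = 2 from by omega, show min (tp - 1) (c + 1) = 3 from by omega]
  rw [PySem.List.pyRange_one_cons (by omega), PySem.List.pyRange_one_cons (by omega),
    PySem.List.pyRange_one_eq_nil (by omega)]
  simp only [List.foldl, List.map, List.append_assoc, List.cons_append, List.nil_append]
  split_ifs <;> simp_all <;> omega

lemma case_mid (tp c : Int) (h : ¬ tp ≤ 7) (h3 : 3 ≤ c) (h2 : c ≤ tp - 2) :
    build_github_like_pages tp c = build_github_like_pages_alt tp c := by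
  simp only [build_github_like_pages, build_github_like_pages_alt, if_neg h]
  have hs : PySem.List.sorted (PySem.Set.ofList (List.filter
      (fun p => decide (1 ≤ p) && decide (p ≤ tp))
      (PySem.Set.ofList [1, tp, c - 1, c, c + 1]))) (fun x => x) = [1, c - 1, c, c + 1, tp] := by
    apply sorted_set_eq
    · refine List.Pairwise.cons ?_ (List.Pairwise.cons ?_ (List.Pairwise.cons ?_
        (List.Pairwise.cons ?_ (List.pairwise_singleton _ _)))) <;>
        (intro a ha; simp only [List.mem_cons, List.not_mem_nil, or_false] at ha; omega)
    · intro a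
      simp only [List.mem_filter, PySem.Set.mem_ofList, List.mem_cons, List.not_mem_nil,
        Bool.and_eq_true, decide_eq_true_eq, or_false]
      omega
  rw [hs]
  rw [show max 2 (c - 1) = c - 1 from by omega, show min (tp - 1) (c + 1) = c + 1 from by omega]
  rw [PySem.List.pyRange_one_cons (by omega), PySem.List.pyRange_one_cons (by omega),
    PySem.List.pyRange_one_cons (by omega), PySem.List.pyRange_one_eq_nil (by omega)]
  simp only [List.foldl, List.map, List.append_assoc, List.cons_append, List.nil_append]
  split_ifs <;> simp_all <;> omega

lemma case_penult (tp c : Int) (h : ¬ tp ≤ 7) (hc : c = tp - 1) :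
    build_github_like_pages tp c = build_github_like_pages_alt tp c := by
  simp only [build_github_like_pages, build_github_like_pages_alt, if_neg h]
  have hs : PySem.List.sorted (PySem.Set.ofList (List.filter
      (fun p => decide (1 ≤ p) && decide (p ≤ tp))
      (PySem.Set.ofList [1, tp, c - 1, c, c + 1]))) (fun x => x) = [1, tp - 2, tp - 1, tp] := by
    apply sorted_set_eq
    · refine List.Pairwise.cons ?_ (List.Pairwise.cons ?_ (List.Pairwise.cons ?_
        (List.pairwise_singleton _ _))) <;>
        (intro a ha; simp only [List.mem_cons, List.not_mem_nil, or_false] at ha; omega)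
    · intro a
      simp only [List.mem_filter, PySem.Set.mem_ofList, List.mem_cons, List.not_mem_nil,
        Bool.and_eq_true, decide_eq_true_eq, or_false]
      omega
  rw [hs]
  rw [show max 2 (c - 1) = tp - 2 from by omega, show min (tp - 1) (c + 1) = tp - 1 from by omega]
  rw [PySem.List.pyRange_one_cons (by omega), PySem.List.pyRange_one_cons (by omega),
    PySem.List.pyRange_one_eq_nil (by omega)]
  simp only [List.foldl, List.map, List.append_assoc, List.cons_append, List.nil_append]
  split_ifs <;> simp_all <;> omega

lemma case_last (tp c : Int) (h : ¬ tp ≤ 7) (hc : c = tp) :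
    build_github_like_pages tp c = build_github_like_pages_alt tp c := by
  simp only [build_github_like_pages, build_github_like_pages_alt, if_neg h]
  have hs : PySem.List.sorted (PySem.Set.ofList (List.filter
      (fun p => decide (1 ≤ p) && decide (p ≤ tp))
      (PySem.Set.ofList [1, tp, c - 1, c, c + 1]))) (fun x => x) = [1, tp - 1, tp] := by
    apply sorted_set_eq
    · refine List.Pairwise.cons ?_ (List.Pairwise.cons ?_ (List.pairwise_singleton _ _)) <;>
        (intro a ha; simp only [List.mem_cons, List.not_mem_nil, or_false] at ha; omega)
    · intro a
      simp only [List.mem_filter, PySem.Set.mem_ofList, List.mem_cons, List.not_mem_nil,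
        Bool.and_eq_true, decide_eq_true_eq, or_false]
      omega
  rw [hs]
  rw [show max 2 (c - 1) = tp - 1 from by omega, show min (tp - 1) (c + 1) = tp - 1 from by omega]
  rw [PySem.List.pyRange_one_cons (by omega), PySem.List.pyRange_one_eq_nil (by omega)]
  simp only [List.foldl, List.map, List.append_assoc, List.cons_append, List.nil_append]
  split_ifs <;> simp_all <;> omega

lemma case_high (tp c : Int) (h : ¬ tp ≤ 7) (hc : tp + 1 ≤ c) :
    build_github_like_pages tp c = build_github_like_pages_alt tp c := by
  simp only [build_github_like_pages, build_github_like_pages_alt, if_neg h]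
  have hs : PySem.List.sorted (PySem.Set.ofList (List.filter
      (fun p => decide (1 ≤ p) && decide (p ≤ tp))
      (PySem.Set.ofList [1, tp, c - 1, c, c + 1]))) (fun x => x) = [1, tp] := by
    apply sorted_set_eq
    · refine List.Pairwise.cons ?_ (List.pairwise_singleton _ _)
      intro a ha; simp only [List.mem_cons, List.not_mem_nil, or_false] at ha; omega
    · intro a
      simp only [List.mem_filter, PySem.Set.mem_ofList, List.mem_cons, List.not_mem_nil,
        Bool.and_eq_true, decide_eq_true_eq, or_false]
      omega
  rw [hs]
  rw [show max 2 (c - 1) = c - 1 from by omega, show min (tp - 1) (c + 1) = tp - 1 from by omega]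
  rw [PySem.List.pyRange_one_eq_nil (by omega)]
  simp only [List.foldl, List.map, List.append_assoc, List.cons_append, List.nil_append]
  split_ifs <;> simp_all <;> omega

-- ===== VERDICT (by name: the statement is the Claim_ definition above) =====
theorem build_github_like_pages_spec : Claim_equal_build_github_like_pages := by
  intro tp c _
  unfold Spec_build_github_like_pages
  by_cases h : tp ≤ 7
  · simp only [build_github_like_pages, build_github_like_pages_alt, if_pos h]
  · have hcase : c ≤ 0 ∨ c = 1 ∨ c = 2 ∨ (3 ≤ c ∧ c ≤ tp - 2) ∨ c = tp - 1 ∨ c = tp ∨ tp + 1 ≤ c := by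
      omega
    rcases hcase with hc | hc | hc | ⟨h3, h2⟩ | hc | hc | hc
    · exact case_low tp c h hc
    · exact case_one tp c h hc
    · exact case_two tp c h hc
    · exact case_mid tp c h h3 h2
    · exact case_penult tp c h hc
    · exact case_last tp c h hc
    · exact case_high tp c h hc
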